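-- pv_equiv track=rewrite | github.com/tlkahn/Language-Model-STS-CFT | data/vbt_triplets.py | assign_corpus_domains
-- ===== SOURCE A (Python) =====
-- def assign_corpus_domains(corpus, domain_map):
--     """Return {domain_id: [corpus_indices]} for domains with >= 2 verses."""
--     domains = {}
--     for idx in range(len(corpus)):
--         d = domain_map[idx]
--         if d == -1:
--             continue
--         domains.setdefault(d, []).append(idx)
--
--     # Filter out singletons
--     return {d: indices for d, indices in domains.items() if len(indices) >= 2}
-- ===== SOURCE B (Python) =====
-- def assign_corpus_domains(corpus, domain_map):
--     """Return {domain_id: [corpus_indices]} for domains with >= 2 verses."""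
--     ds = [domain_map[i] for i in range(len(corpus))]
--     keys = [d for d in dict.fromkeys(ds) if d != -1 and ds.count(d) >= 2]
--     return {d: [i for i, x in enumerate(ds) if x == d] for d in keys}
-- ===== Notes on version B (the rewrite author's own statement) =====
-- stated objective: alternative
-- what changed: Instead of one accumulation pass growing per-domain lists in a dict and filtering afterwards, B materialises the relevant domain values, computes the qualifying domain keys up front (ordered dedup + count >= 2), and builds each domain's index list by a separate scan per key.
import Mathlib
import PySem

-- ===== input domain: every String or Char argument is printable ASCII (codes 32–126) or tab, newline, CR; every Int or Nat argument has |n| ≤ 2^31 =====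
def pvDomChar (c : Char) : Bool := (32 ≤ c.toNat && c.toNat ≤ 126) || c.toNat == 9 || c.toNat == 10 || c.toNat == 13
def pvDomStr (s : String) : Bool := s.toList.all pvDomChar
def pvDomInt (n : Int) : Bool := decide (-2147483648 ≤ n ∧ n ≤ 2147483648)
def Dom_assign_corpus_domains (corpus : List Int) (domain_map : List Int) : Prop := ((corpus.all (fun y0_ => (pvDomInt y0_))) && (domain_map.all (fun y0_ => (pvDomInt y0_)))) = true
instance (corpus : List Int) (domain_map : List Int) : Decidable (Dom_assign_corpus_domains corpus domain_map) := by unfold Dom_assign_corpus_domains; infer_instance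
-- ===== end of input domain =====

-- B trades A's single accumulation pass (dict of growing lists, filtered afterwards)
-- for: dedup+count to pick the qualifying keys first, then one scan per key to collect its indices.

-- ===== PORT A =====
-- domains = {}; for idx in range(len(corpus)): d = domain_map[idx]; if d == -1: continue; domains.setdefault(d, []).append(idx)
-- return {d: indices for d, indices in domains.items() if len(indices) >= 2}
def assign_corpus_domains (corpus : List Int) (domain_map : List Int) : List (Int × List Int) :=
  let domains : PySem.Dict Int (List Int) :=
    (PySem.List.pyRange 0 corpus.length 1).foldl
      (fun dct idx =>
        let d := PySem.List.pyGetD domain_map idx 0   -- total form; Pre_ guarantees idx in range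
        if d == -1 then dct else dct.modify d [] (· ++ [idx]))
      PySem.Dict.empty
  domains.items.filter (fun p => decide (2 ≤ p.2.length))

-- ===== PORT B =====
-- ds = [domain_map[i] for i in range(len(corpus))]
-- keys = [d for d in dict.fromkeys(ds) if d != -1 and ds.count(d) >= 2]
-- return {d: [i for i, x in enumerate(ds) if x == d] for d in keys}
def assign_corpus_domains_alt (corpus : List Int) (domain_map : List Int) : List (Int × List Int) :=
  let ds := (PySem.List.pyRange 0 corpus.length 1).map
    (fun i => PySem.List.pyGetD domain_map i 0)       -- total form; Pre_ guarantees i in range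
  let keys := (PySem.List.dedup ds).filter (fun d => d != -1 && decide (2 ≤ PySem.List.count ds d))
  keys.map (fun d => (d, ((PySem.List.enumerate ds 0).filter (fun p => p.2 == d)).map (·.1)))

-- ===== PRECONDITION & SPEC =====
-- Pre_ excludes exactly the inputs where A (and B) raise IndexError (domain_map shorter than corpus).
def Pre_assign_corpus_domains (corpus : List Int) (domain_map : List Int) : Prop :=
  corpus.length ≤ domain_map.length
instance (corpus : List Int) (domain_map : List Int) : Decidable (Pre_assign_corpus_domains corpus domain_map) := by unfold Pre_assign_corpus_domains; infer_instance
def pvWitness_assign_corpus_domains : List Int × List Int := ([10, 20, 30], [5, -1, 5])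

def Spec_assign_corpus_domains (corpus : List Int) (domain_map : List Int) (out : List (Int × List Int)) : Prop := out = assign_corpus_domains_alt corpus domain_map
instance (corpus : List Int) (domain_map : List Int) (out : List (Int × List Int)) : Decidable (Spec_assign_corpus_domains corpus domain_map out) := by unfold Spec_assign_corpus_domains; infer_instance

-- ===== CLAIM (what is proved, stated in full; the proofs are below) =====
def Claim_equal_assign_corpus_domains : Prop := ∀ (corpus : List Int) (domain_map : List Int), Dom_assign_corpus_domains corpus domain_map → Pre_assign_corpus_domains corpus domain_map → Spec_assign_corpus_domains corpus domain_map (assign_corpus_domains corpus domain_map)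

-- ===== LEMMAS AND PROOFS =====

-- B's comprehension over range(len(corpus)) is the take-prefix of domain_map (in range under Pre_)
theorem pv_ds_take (corpus domain_map : List Int) (h : corpus.length ≤ domain_map.length) :
    (PySem.List.pyRange 0 corpus.length 1).map (fun i => PySem.List.pyGetD domain_map i 0)
      = domain_map.take corpus.length := by
  apply List.ext_getElem
  · simp [PySem.List.length_pyRange_one, List.length_take]; omega
  · intro k hk1 hk2
    simp only [List.getElem_map, PySem.List.getElem_pyRange_one, List.getElem_take]
    rw [List.length_take] at hk2
    have hk : k < corpus.length := by omega
    rw [PySem.List.pyGetD_eq_getElem domain_map 0 (by omega : (0:Int) ≤ 0 + k)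
      (by omega)]
    simp

-- filter commutes with Set.add
theorem pv_filter_add {α : Type} [BEq α] [LawfulBEq α] (q : α → Bool) (s : List α) (x : α) :
    (PySem.Set.add s x).filter q = if q x then PySem.Set.add (s.filter q) x else s.filter q := by
  by_cases hq : q x
  · by_cases hm : x ∈ s
    · have h1 : PySem.Set.add s x = s := by simp [PySem.Set.add, PySem.Set.contains, hm]
      have h2 : PySem.Set.add (s.filter q) x = s.filter q := by
        simp [PySem.Set.add, PySem.Set.contains, List.mem_filter, hm, hq]
      simp [h1, h2, hq]
    · have h1 : PySem.Set.add s x = s ++ [x] := by simp [PySem.Set.add, PySem.Set.contains, hm]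
      have h2 : PySem.Set.add (s.filter q) x = s.filter q ++ [x] := by
        simp [PySem.Set.add, PySem.Set.contains, List.mem_filter, hm]
      simp [h1, h2, hq, List.filter_append]
  · have h2 : (PySem.Set.add s x).filter q = s.filter q := by
      by_cases hm : x ∈ s
      · simp [PySem.Set.add, PySem.Set.contains, hm]
      · simp [PySem.Set.add, PySem.Set.contains, hm, List.filter_append, hq]
    simp [h2, hq]

theorem pv_foldl_add_filter {α : Type} [BEq α] [LawfulBEq α] (q : α → Bool) :
    ∀ (l s : List α), (l.foldl PySem.Set.add s).filter q = (l.filter q).foldl PySem.Set.add (s.filter q)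
  | [], s => rfl
  | x :: l, s => by
    simp only [List.foldl_cons, List.filter_cons]
    rw [pv_foldl_add_filter q l (PySem.Set.add s x), pv_filter_add]
    by_cases hq : q x <;> simp [hq]

theorem pv_dedup_filter {α : Type} [BEq α] [LawfulBEq α] (q : α → Bool) (l : List α) :
    (PySem.List.dedup l).filter q = PySem.List.dedup (l.filter q) := by
  rw [PySem.List.dedup_eq_ofList, PySem.List.dedup_eq_ofList, PySem.Set.ofList_eq_foldl,
    PySem.Set.ofList_eq_foldl, pv_foldl_add_filter]
  rfl

-- filtered enumerate projected to the values
theorem pv_enum_filter_snd {α : Type} (q : α → Bool) (ds : List α) (s : Int) :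
    ((PySem.List.enumerate ds s).filter (fun p => q p.2)).map (·.2) = ds.filter q := by
  have h := @List.filter_map (Int × α) α (fun p => p.2) q (PySem.List.enumerate ds s)
  rw [PySem.List.map_snd_enumerate] at h
  exact h.symm

theorem pv_enum_filter_len {α : Type} [BEq α] (k : α) (ds : List α) (s : Int) :
    ((PySem.List.enumerate ds s).filter (fun p => p.2 == k)).length = List.count k ds := by
  have h := congrArg List.length (pv_enum_filter_snd (fun x => x == k) ds s)
  simp only [List.length_map] at h
  rw [h, List.count_eq_countP, ← List.countP_eq_length_filter]

theorem pv_filter_map_fn {α β : Type} (g : α → β) (p : β → Bool) (l : List α) :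
    (l.map g).filter p = (l.filter (fun x => p (g x))).map g := List.filter_map

-- getD of the append-grouping fold keyed on the SECOND component
theorem pv_getD_snd (l : List (Int × Int)) (d : PySem.Dict Int (List Int)) (c : Int) :
    (l.foldl (fun dct p => dct.modify p.2 [] (· ++ [p.1])) d).getD c []
      = d.getD c [] ++ (l.filter (fun p => p.2 == c)).map (·.1) := by
  have h := PySem.Dict.getD_foldl_modify_append (l.map Prod.swap) d c
  rw [List.foldl_map, List.filter_map, List.map_map] at h
  simpa [Function.comp] using h

-- ===== VERDICT (by name: the statement is the Claim_ definition above) =====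
theorem assign_corpus_domains_spec : Claim_equal_assign_corpus_domains := by
  intro corpus dm _ hpre
  unfold Pre_assign_corpus_domains at hpre
  unfold Spec_assign_corpus_domains
  simp only [assign_corpus_domains, assign_corpus_domains_alt]
  rw [pv_ds_take corpus dm hpre]
  set ds : List Int := dm.take corpus.length with hds
  have hlen : ds.length = corpus.length := by rw [hds, List.length_take]; omega
  set lf : List (Int × Int) := (PySem.List.enumerate ds 0).filter (fun p => !(p.2 == -1)) with hlf
  set D : PySem.Dict Int (List Int) :=
    lf.foldl (fun dct p => dct.modify p.2 [] (· ++ [p.1])) PySem.Dict.empty with hD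
  -- Step 1: A's range-fold is the fold over the enumerated prefix
  have h1 : (PySem.List.pyRange 0 (corpus.length : Int) 1).foldl
      (fun dct idx =>
        let d := PySem.List.pyGetD dm idx 0
        if d == -1 then dct else dct.modify d [] (· ++ [idx])) PySem.Dict.empty
      = (PySem.List.enumerate ds 0).foldl
        (fun dct p => if p.2 == -1 then dct else dct.modify p.2 [] (· ++ [p.1]))
        PySem.Dict.empty := by
    rw [PySem.List.enumerate_eq_map_pyRange ds 0, List.foldl_map]
    have hl : PySem.List.len ds = (corpus.length : Int) := by
      simp [PySem.List.len_eq, hlen]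
    rw [hl]
    apply PySem.List.foldl_congr_mem
    intro acc x hx
    have hx' := PySem.List.mem_pyRange_one.1 hx
    have hxl : x < (dm.length : Int) := by
      have : (corpus.length : Int) ≤ (dm.length : Int) := by exact_mod_cast hpre
      omega
    have hg : PySem.List.pyGetD dm x 0 = PySem.List.pyGetD ds x 0 := by
      rw [PySem.List.pyGetD_eq_getElem dm 0 hx'.1 hxl,
        PySem.List.pyGetD_eq_getElem ds 0 hx'.1 (by rw [hlen]; exact_mod_cast hx'.2)]
      simp [hds]
    simp only [hg]
  -- Step 2: skip-if fold = fold over the filtered list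
  have h2 : (PySem.List.enumerate ds 0).foldl
        (fun dct p => if p.2 == -1 then dct else dct.modify p.2 [] (· ++ [p.1]))
        PySem.Dict.empty = D := by
    rw [hD, hlf, List.foldl_filter]
    apply PySem.List.foldl_congr_mem
    intro acc p _
    by_cases h : p.2 == -1 <;> simp [h]
  rw [h1, h2]
  -- keys of D
  have hm : (List.filter (fun p => !(p.2 == -1)) (PySem.List.enumerate ds 0)).map (fun p => p.2)
      = ds.filter (fun d => !(d == -1)) := pv_enum_filter_snd (fun d => !(d == -1)) ds 0
  have hkeys : D.keys = PySem.List.dedup (ds.filter (fun d => !(d == -1))) := by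
    rw [hD, PySem.Dict.keys_foldl_modify_key lf (fun p => p.2) [] (fun _ p => (· ++ [p.1])), hlf,
      hm, PySem.List.dedup_eq_ofList]
    rfl
  have hnodup : D.keys.Nodup := by
    rw [hD]
    exact PySem.Dict.nodup_keys_foldl_modify_key lf (fun p => p.2) [] (fun _ p => (· ++ [p.1]))
      PySem.Dict.empty (by simp [PySem.Dict.keys_empty])
  -- values of D
  have hget : ∀ k : Int, k ≠ -1 → D.getD k []
      = ((PySem.List.enumerate ds 0).filter (fun p => p.2 == k)).map (·.1) := by
    intro k hk
    rw [hD, pv_getD_snd, hlf, List.filter_filter, PySem.Dict.getD_empty, List.nil_append]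
    have hcong : List.filter (fun a => a.2 == k && !(a.2 == -1)) (PySem.List.enumerate ds 0)
        = List.filter (fun p => p.2 == k) (PySem.List.enumerate ds 0) := by
      apply List.filter_congr
      intro p _
      by_cases h : p.2 = k
      · simp [h, hk]
      · simp [h]
    rw [hcong]
  have hlen2 : ∀ k : Int,
      (((PySem.List.enumerate ds 0).filter (fun p => p.2 == k)).map (fun p => p.1)).length
        = List.count k ds := by
    intro k
    simp only [List.length_map]
    exact pv_enum_filter_len k ds 0
  -- items of D, push A's final filter through the map, align the key lists
  rw [PySem.Dict.items_eq_map_keys D hnodup []]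
  simp only [pv_filter_map_fn]
  rw [hkeys]
  have hstep : (PySem.List.dedup (ds.filter (fun d => !(d == -1)))).filter
      (fun k => decide (2 ≤ (D.getD k []).length))
      = (PySem.List.dedup ds).filter (fun d => d != -1 && decide (2 ≤ PySem.List.count ds d)) := by
    rw [← pv_dedup_filter (fun d => !(d == -1)) ds, List.filter_filter]
    apply List.filter_congr
    intro k _
    by_cases hk : k = (-1 : Int)
    · simp [hk]
    · rw [hget k hk]
      simp only [hlen2 k, PySem.List.count_eq, bne]
      rw [Bool.and_comm]
      rfl
  rw [hstep]
  apply List.map_congr_left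
  intro k hkm
  have hk1 : k ≠ (-1 : Int) := by
    have h := List.of_mem_filter hkm
    intro h2
    simp [h2] at h
  rw [hget k hk1]
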